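-- pv_equiv track=rewrite | github.com/aarush-narang/Python-Projects | Utility/ListFunctions.py | common_entries_triple
-- ===== SOURCE A (Python) =====
-- def common_entries_triple(arr1, arr2, arr3):
--     common_entries = [] # common entries in the arrays will be stored here
--     for i in range(0, len(arr1)):
--         for j in range(0, len(arr2)):
--             for k in range(0, len(arr3)):
--                 if arr1[i] == arr2[j] == arr3[k]: # if the value from the 1st array is = to the value from the 2nd array and both are equal to the value from the 3rd, append it to the array 'common_entries'
--                     common_entries.append(arr3[k])
--     return common_entries
-- ===== SOURCE B (Python) =====
-- def common_entries_triple(arr1, arr2, arr3):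
--     c2 = {}
--     for v in arr2:
--         c2[v] = c2.get(v, 0) + 1
--     c3 = {}
--     for v in arr3:
--         c3[v] = c3.get(v, 0) + 1
--     out = []
--     for v in arr1:
--         out.extend([v] * (c2.get(v, 0) * c3.get(v, 0)))
--     return out
-- ===== Notes on version B (the rewrite author's own statement) =====
-- stated objective: alternative
-- what changed: Replaced the triple nested index scan with two count dictionaries built once over arr2 and arr3 and a single pass over arr1 appending each value count2*count3 times; measured ~3x at n=256 but unconfirmed at the largest size (the output itself grows cubically on duplicate-heavy inputs).
import Mathlib
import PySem

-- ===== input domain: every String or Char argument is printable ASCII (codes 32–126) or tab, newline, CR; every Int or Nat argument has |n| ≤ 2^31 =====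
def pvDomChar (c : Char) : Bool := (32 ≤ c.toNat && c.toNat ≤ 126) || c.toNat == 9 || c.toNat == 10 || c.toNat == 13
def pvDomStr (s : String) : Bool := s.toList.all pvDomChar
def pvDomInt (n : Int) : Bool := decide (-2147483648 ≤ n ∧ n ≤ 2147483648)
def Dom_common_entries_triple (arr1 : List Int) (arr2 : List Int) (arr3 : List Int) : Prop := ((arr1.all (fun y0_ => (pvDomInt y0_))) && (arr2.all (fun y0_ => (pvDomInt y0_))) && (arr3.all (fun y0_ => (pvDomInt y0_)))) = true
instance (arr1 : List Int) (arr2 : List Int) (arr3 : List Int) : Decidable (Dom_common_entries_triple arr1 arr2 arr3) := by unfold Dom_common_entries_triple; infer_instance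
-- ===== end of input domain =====

-- B replaces A's triple nested scan by two count dictionaries and one pass over arr1 appending each value count2*count3 times.

-- ===== PORT A =====
-- literal port of A: three nested index loops over range(len(...)), appending arr3[k] on a triple match
def common_entries_triple (arr1 : List Int) (arr2 : List Int) (arr3 : List Int) : List Int :=
  (PySem.List.pyRange 0 (arr1.length : Int)).foldl (fun acc i =>
    (PySem.List.pyRange 0 (arr2.length : Int)).foldl (fun acc j =>
      (PySem.List.pyRange 0 (arr3.length : Int)).foldl (fun acc k =>
        if PySem.List.pyGetD arr1 i 0 = PySem.List.pyGetD arr2 j 0 ∧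
           PySem.List.pyGetD arr2 j 0 = PySem.List.pyGetD arr3 k 0
        then acc ++ [PySem.List.pyGetD arr3 k 0] else acc) acc) acc) []

-- ===== PORT B =====
-- port of B: counter dicts for arr2 and arr3, then one pass over arr1 appending v count2*count3 times
def common_entries_triple_alt (arr1 : List Int) (arr2 : List Int) (arr3 : List Int) : List Int :=
  let c2 : PySem.Dict Int Int := arr2.foldl (fun d v => d.insert v (d.getD v 0 + 1)) PySem.Dict.empty
  let c3 : PySem.Dict Int Int := arr3.foldl (fun d v => d.insert v (d.getD v 0 + 1)) PySem.Dict.empty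
  arr1.foldl (fun out v => out ++ List.replicate (c2.getD v 0 * c3.getD v 0).toNat v) []

-- ===== PRECONDITION & SPEC =====
def Spec_common_entries_triple (arr1 : List Int) (arr2 : List Int) (arr3 : List Int) (out : List Int) : Prop := out = common_entries_triple_alt arr1 arr2 arr3
instance (arr1 : List Int) (arr2 : List Int) (arr3 : List Int) (out : List Int) : Decidable (Spec_common_entries_triple arr1 arr2 arr3 out) := by unfold Spec_common_entries_triple; infer_instance

-- ===== CLAIM (what is proved, stated in full; the proofs are below) =====
def Claim_equal_common_entries_triple : Prop := ∀ (arr1 : List Int) (arr2 : List Int) (arr3 : List Int), Dom_common_entries_triple arr1 arr2 arr3 → Spec_common_entries_triple arr1 arr2 arr3 (common_entries_triple arr1 arr2 arr3)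

-- ===== LEMMAS AND PROOFS =====

-- innermost loop over arr3's elements: appends one copy of y per element equal to y, provided a = y
theorem inner3_eq (a y : Int) (arr3 : List Int) (acc : List Int) :
    arr3.foldl (fun acc z => if a = y ∧ y = z then acc ++ [z] else acc) acc
      = acc ++ (if a = y then List.replicate (arr3.count y) y else []) := by
  induction arr3 generalizing acc with
  | nil => simp
  | cons z t ih =>
    simp only [List.foldl_cons, ih, List.count_cons]
    by_cases ha : a = y
    · by_cases hz : y = z
      · subst hz
        simp [ha, List.replicate_succ]
      · simp [ha, hz, Ne.symm hz]
    · simp [ha]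

-- middle loop over arr2's elements: total appended = (count of a in arr2) * (count of a in arr3)
theorem inner2_eq (a : Int) (arr2 arr3 : List Int) (acc : List Int) :
    arr2.foldl (fun acc y =>
        arr3.foldl (fun acc z => if a = y ∧ y = z then acc ++ [z] else acc) acc) acc
      = acc ++ List.replicate (arr2.count a * arr3.count a) a := by
  induction arr2 generalizing acc with
  | nil => simp
  | cons y t ih =>
    simp only [List.foldl_cons]
    rw [inner3_eq, ih, List.count_cons]
    by_cases hy : a = y
    · subst hy
      rw [if_pos rfl, if_pos (by simp), List.append_assoc, ← List.replicate_add]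
      congr 2
      ring
    · simp [hy, Ne.symm hy]

-- counter-dictionary lookup = list count
theorem counterD_eq (xs : List Int) (v : Int) :
    (xs.foldl (fun d x => d.insert x (d.getD x 0 + 1)) PySem.Dict.empty).getD v 0
      = (xs.count v : Int) := by
  rw [PySem.Dict.foldl_insert_getD_add_one_eq_counter, PySem.Dict.getD_counter]

-- A's nested index loops equal a single element pass appending count2*count3 copies of each arr1 value
theorem ports_agree (arr1 arr2 arr3 : List Int) :
    common_entries_triple arr1 arr2 arr3 = common_entries_triple_alt arr1 arr2 arr3 := by
  unfold common_entries_triple common_entries_triple_alt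
  simp only [counterD_eq]
  rw [PySem.List.foldl_pyRange_zero_pyGetD' arr1 0
      (fun acc a =>
        (PySem.List.pyRange 0 (arr2.length : Int)).foldl (fun acc j =>
          (PySem.List.pyRange 0 (arr3.length : Int)).foldl (fun acc k =>
            if a = PySem.List.pyGetD arr2 j 0 ∧
               PySem.List.pyGetD arr2 j 0 = PySem.List.pyGetD arr3 k 0
            then acc ++ [PySem.List.pyGetD arr3 k 0] else acc) acc) acc) []]
  apply PySem.List.foldl_congr_mem
  intro acc a _
  rw [PySem.List.foldl_pyRange_zero_pyGetD' arr2 0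
      (fun acc y =>
        (PySem.List.pyRange 0 (arr3.length : Int)).foldl (fun acc k =>
          if a = y ∧ y = PySem.List.pyGetD arr3 k 0
          then acc ++ [PySem.List.pyGetD arr3 k 0] else acc) acc) acc]
  have h3 : ∀ (acc : List Int) (y : Int),
      (PySem.List.pyRange 0 (arr3.length : Int)).foldl (fun acc k =>
          if a = y ∧ y = PySem.List.pyGetD arr3 k 0
          then acc ++ [PySem.List.pyGetD arr3 k 0] else acc) acc
        = arr3.foldl (fun acc z => if a = y ∧ y = z then acc ++ [z] else acc) acc := by
    intro acc y
    exact PySem.List.foldl_pyRange_zero_pyGetD' arr3 0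
      (fun acc z => if a = y ∧ y = z then acc ++ [z] else acc) acc
  rw [PySem.List.foldl_congr_mem arr2 _ _ acc (fun acc y _ => h3 acc y), inner2_eq]
  rw [← Nat.cast_mul, Int.toNat_natCast]

-- ===== VERDICT (by name: the statement is the Claim_ definition above) =====
theorem common_entries_triple_spec : Claim_equal_common_entries_triple := by
  intro arr1 arr2 arr3 _
  exact ports_agree arr1 arr2 arr3
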